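-- pv_equiv track=rewrite | github.com/poluzerovT/mms-10-2025 | Kalchevskaya/mms_lab2.py | calculate_dominant_series
-- ===== SOURCE A (Python) =====
-- from typing import List, Tuple, Callable
--
-- W = [
--     [3, 0],  # i=0 (сотрудничать)
--     [5, 1]   # i=1 (предать)
-- ]
--
-- def calculate_dominant_series(history: List[Tuple[int, int]]) -> Tuple[int, int]:
--     """Вычисляет длину наибольшей доминирующей серии для каждого игрока"""
--     max_s1_dominant = 0
--     max_s2_dominant = 0
--     current_s1_dominant = 0
--     current_s2_dominant = 0
--
--     for s1_move, s2_move in history: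
--         s1_score = W[s1_move][s2_move]
--         s2_score = W[s2_move][s1_move]
--
--         # Проверяем доминирование первого игрока (5 vs 0)
--         if s1_score == 5 and s2_score == 0:
--             current_s1_dominant += 1
--             current_s2_dominant = 0
--         # Проверяем доминирование второго игрока (5 vs 0)
--         elif s2_score == 5 and s1_score == 0:
--             current_s2_dominant += 1
--             current_s1_dominant = 0
--         else:
--             current_s1_dominant = 0
--             current_s2_dominant = 0
--
--         max_s1_dominant = max(max_s1_dominant, current_s1_dominant)
--         max_s2_dominant = max(max_s2_dominant, current_s2_dominant)
--
--     return max_s1_dominant, max_s2_dominant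
-- ===== SOURCE B (Python) =====
-- from itertools import groupby
-- from typing import List, Tuple
--
-- W = [
--     [3, 0],
--     [5, 1],
-- ]
--
-- def _label(move):
--     """Round label: 1 if player 1 dominates (5 vs 0), 2 if player 2 does, else 0."""
--     a, b = move
--     sa, sb = W[a][b], W[b][a]
--     if sa == 5 and sb == 0:
--         return 1
--     if sb == 5 and sa == 0:
--         return 2
--     return 0
--
-- def calculate_dominant_series(history: List[Tuple[int, int]]) -> Tuple[int, int]:
--     labels = [_label(move) for move in history]
--     best = {1: 0, 2: 0}
--     for key, group in groupby(labels):
--         if key != 0: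
--             best[key] = max(best[key], sum(1 for _ in group))
--     return best[1], best[2]
-- ===== Notes on version B (the rewrite author's own statement) =====
-- stated objective: alternative
-- what changed: Replaces the stateful dual-counter streak machine with a two-phase pass: first map each round to a dominance label (0/1/2), then measure maximal run lengths of labels 1 and 2 with itertools.groupby.
import Mathlib
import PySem

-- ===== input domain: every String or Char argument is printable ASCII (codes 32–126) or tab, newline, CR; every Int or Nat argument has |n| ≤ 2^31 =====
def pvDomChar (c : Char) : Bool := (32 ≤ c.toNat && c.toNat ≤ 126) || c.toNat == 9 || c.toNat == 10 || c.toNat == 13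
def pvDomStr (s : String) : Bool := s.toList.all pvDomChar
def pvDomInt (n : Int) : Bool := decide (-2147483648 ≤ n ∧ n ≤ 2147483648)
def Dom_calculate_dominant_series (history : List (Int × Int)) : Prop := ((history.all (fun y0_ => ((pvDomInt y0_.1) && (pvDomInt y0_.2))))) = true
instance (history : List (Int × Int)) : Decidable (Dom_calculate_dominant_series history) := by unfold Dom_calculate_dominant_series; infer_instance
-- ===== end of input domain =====

-- B replaces A's stateful dual-counter streak machine with a two-phase pass: label every round, then take maximal run lengths per label (alternative decomposition, same cost).

-- ===== PORT A =====
-- the payoff matrix W of Source A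
def pvW_A : List (List Int) := [[3, 0], [5, 1]]

-- W[i][j] with Python indexing; the default is never reached inside Pre_
def pvScore_A (i j : Int) : Int :=
  (PySem.List.pyGet? ((PySem.List.pyGet? pvW_A i).getD []) j).getD 0

-- one iteration of A's loop: state (max_s1, max_s2, cur_s1, cur_s2)
def pvStep_A (st : Int × Int × Int × Int) (mv : Int × Int) : Int × Int × Int × Int :=
  let s1 := pvScore_A mv.1 mv.2
  let s2 := pvScore_A mv.2 mv.1
  let cur :=
    if s1 = 5 ∧ s2 = 0 then (st.2.2.1 + 1, (0 : Int))
    else if s2 = 5 ∧ s1 = 0 then ((0 : Int), st.2.2.2 + 1)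
    else ((0 : Int), (0 : Int))
  (max st.1 cur.1, max st.2.1 cur.2, cur.1, cur.2)

def calculate_dominant_series (history : List (Int × Int)) : Int × Int :=
  let st := history.foldl pvStep_A (0, 0, 0, 0)
  (st.1, st.2.1)

-- ===== PORT B =====
-- Source B's own copy of the payoff matrix
def pvW_B : List (List Int) := [[3, 0], [5, 1]]

def pvScore_B (i j : Int) : Int :=
  (PySem.List.pyGet? ((PySem.List.pyGet? pvW_B i).getD []) j).getD 0

-- Source B's _label: 1 if player 1 dominates the round, 2 if player 2 does, else 0
def pvLabel (a b : Int) : Int :=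
  let sa := pvScore_B a b
  let sb := pvScore_B b a
  if sa = 5 ∧ sb = 0 then 1
  else if sb = 5 ∧ sa = 0 then 2
  else 0

-- itertools.groupby: list of (key, run length)
def pvRuns : List Int → List (Int × Int)
  | [] => []
  | x :: xs =>
    (x, 1 + (xs.takeWhile (fun y => y == x)).length) ::
      pvRuns (xs.dropWhile (fun y => y == x))
termination_by l => l.length
decreasing_by
  simpa using Nat.lt_succ_of_le (List.length_dropWhile_le _ _)

-- the dict {1: best1, 2: best2} as a pair, updated per group
def pvBestStep (b : Int × Int) (r : Int × Int) : Int × Int :=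
  if r.1 = 1 then (max b.1 r.2, b.2)
  else if r.1 = 2 then (b.1, max b.2 r.2)
  else b

def calculate_dominant_series_alt (history : List (Int × Int)) : Int × Int :=
  let labels := history.map (fun mv => pvLabel mv.1 mv.2)
  (pvRuns labels).foldl pvBestStep (0, 0)

-- ===== PRECONDITION & SPEC =====
-- Pre_: every move is a valid Python index into the 2×2 matrix W (−2 … 1);
-- outside this, Python's A raises IndexError, so exactly these inputs are excluded.
def Pre_calculate_dominant_series (history : List (Int × Int)) : Prop :=
  ∀ p ∈ history, -2 ≤ p.1 ∧ p.1 < 2 ∧ -2 ≤ p.2 ∧ p.2 < 2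
instance (history : List (Int × Int)) : Decidable (Pre_calculate_dominant_series history) := by
  unfold Pre_calculate_dominant_series; infer_instance

def pvWitness_calculate_dominant_series : (List (Int × Int)) := [(1, 0), (0, 1), (-1, -2), (1, 0)]

def Spec_calculate_dominant_series (history : List (Int × Int)) (out : Int × Int) : Prop := out = calculate_dominant_series_alt history
instance (history : List (Int × Int)) (out : Int × Int) : Decidable (Spec_calculate_dominant_series history out) := by unfold Spec_calculate_dominant_series; infer_instance

-- ===== CLAIM (what is proved, stated in full; the proofs are below) =====
def Claim_equal_calculate_dominant_series : Prop := ∀ (history : List (Int × Int)), Dom_calculate_dominant_series history → Pre_calculate_dominant_series history → Spec_calculate_dominant_series history (calculate_dominant_series history)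

-- ===== LEMMAS AND PROOFS =====

-- A's step, rephrased on the round's label
def pvStepL (st : Int × Int × Int × Int) (l : Int) : Int × Int × Int × Int :=
  let cur :=
    if l = 1 then (st.2.2.1 + 1, (0 : Int))
    else if l = 2 then ((0 : Int), st.2.2.2 + 1)
    else ((0 : Int), (0 : Int))
  (max st.1 cur.1, max st.2.1 cur.2, cur.1, cur.2)

lemma stepA_eq_stepL (st : Int × Int × Int × Int) (mv : Int × Int) :
    pvStep_A st mv = pvStepL st (pvLabel mv.1 mv.2) := by
  unfold pvStep_A pvStepL pvLabel
  have h : pvScore_B = pvScore_A := by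
    funext i j; simp [pvScore_A, pvScore_B, pvW_A, pvW_B]
  rw [h]
  by_cases h1 : pvScore_A mv.1 mv.2 = 5 ∧ pvScore_A mv.2 mv.1 = 0
  · norm_num [h1]
  · by_cases h2 : pvScore_A mv.2 mv.1 = 5 ∧ pvScore_A mv.1 mv.2 = 0
    · norm_num [h1, h2]
    · norm_num [h1, h2]

-- A's fold = label fold
lemma foldA_eq_foldL (history : List (Int × Int)) (st : Int × Int × Int × Int) :
    history.foldl pvStep_A st
      = (history.map (fun mv => pvLabel mv.1 mv.2)).foldl pvStepL st := by
  induction history generalizing st with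
  | nil => rfl
  | cons mv t ih => simp [List.foldl_cons, stepA_eq_stepL, ih]

-- best-fold is a componentwise max accumulator: shifting the start only maxes in
lemma bestNonneg (rs : List (Int × Int)) (a b : Int) (ha : 0 ≤ a) (hb : 0 ≤ b) :
    0 ≤ (rs.foldl pvBestStep (a, b)).1 ∧ 0 ≤ (rs.foldl pvBestStep (a, b)).2 := by
  induction rs generalizing a b with
  | nil => exact ⟨ha, hb⟩
  | cons r t ih =>
    simp only [List.foldl_cons, pvBestStep]
    split_ifs <;> exact ih _ _ (by omega) (by omega)

lemma bestShift (rs : List (Int × Int)) (a b : Int) (ha : 0 ≤ a) (hb : 0 ≤ b) :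
    rs.foldl pvBestStep (a, b)
      = (max a (rs.foldl pvBestStep (0, 0)).1, max b (rs.foldl pvBestStep (0, 0)).2) := by
  induction rs generalizing a b with
  | nil => simp; constructor <;> omega
  | cons r t ih =>
    simp only [List.foldl_cons, pvBestStep]
    split_ifs with h1 h2
    · rw [ih (max a r.2) b (by omega) hb, ih (max 0 r.2) 0 (by omega) le_rfl]
      have := (bestNonneg t 0 0 le_rfl le_rfl)
      rw [Prod.ext_iff]; constructor <;> simp <;> omega
    · rw [ih a (max b r.2) ha (by omega), ih 0 (max 0 r.2) le_rfl (by omega)]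
      have := (bestNonneg t 0 0 le_rfl le_rfl)
      rw [Prod.ext_iff]; constructor <;> simp <;> omega
    · rw [ih a b ha hb]

-- processing a uniform block of label-1 rounds
lemma onesBlock (t : List Int) (ht : ∀ y ∈ t, y = 1) :
    ∀ m1 m2 c1 : Int, 0 ≤ m2 → c1 ≤ m1 →
    t.foldl pvStepL (m1, m2, c1, 0)
      = (max m1 (c1 + t.length), m2, c1 + t.length, 0) := by
  induction t with
  | nil =>
    intro m1 m2 c1 hm2 hc
    simp only [List.foldl_nil, List.length_nil, Nat.cast_zero, add_zero, Prod.mk.injEq, and_true, true_and]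
    omega
  | cons y t ih =>
    intro m1 m2 c1 hm2 hc
    have hy : y = 1 := ht y (by simp)
    subst hy
    have h1 : pvStepL (m1, m2, c1, 0) 1 = (max m1 (c1 + 1), max m2 0, c1 + 1, 0) := by
      norm_num [pvStepL]
    rw [List.foldl_cons, h1, max_eq_left hm2,
        ih (fun y hy => ht y (by simp [hy])) _ _ _ hm2 (le_max_right _ _)]
    simp only [Prod.mk.injEq, List.length_cons, and_true, true_and]
    push_cast
    omega

lemma twosBlock (t : List Int) (ht : ∀ y ∈ t, y = 2) :
    ∀ m1 m2 c2 : Int, 0 ≤ m1 → c2 ≤ m2 →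
    t.foldl pvStepL (m1, m2, 0, c2)
      = (m1, max m2 (c2 + t.length), 0, c2 + t.length) := by
  induction t with
  | nil =>
    intro m1 m2 c2 hm1 hc
    simp only [List.foldl_nil, List.length_nil, Nat.cast_zero, add_zero, Prod.mk.injEq, and_true, true_and]
    omega
  | cons y t ih =>
    intro m1 m2 c2 hm1 hc
    have hy : y = 2 := ht y (by simp)
    subst hy
    have h2 : pvStepL (m1, m2, 0, c2) 2 = (max m1 0, max m2 (c2 + 1), 0, c2 + 1) := by
      norm_num [pvStepL]
    rw [List.foldl_cons, h2, max_eq_left hm1,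
        ih (fun y hy => ht y (by simp [hy])) _ _ _ hm1 (le_max_right _ _)]
    simp only [Prod.mk.injEq, List.length_cons, and_true, true_and]
    push_cast
    omega

lemma zerosBlock (t : List Int) (ht : ∀ y ∈ t, y ≠ 1 ∧ y ≠ 2) (m1 m2 : Int)
    (hm1 : 0 ≤ m1) (hm2 : 0 ≤ m2) :
    t.foldl pvStepL (m1, m2, 0, 0) = (m1, m2, 0, 0) := by
  induction t with
  | nil => rfl
  | cons y t ih =>
    have hy := ht y (by simp)
    have h0 : pvStepL (m1, m2, 0, 0) y = (m1, m2, 0, 0) := by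
      simp only [pvStepL, if_neg hy.1, if_neg hy.2]
      simp only [Prod.mk.injEq, and_true, true_and]
      omega
    rw [List.foldl_cons, h0]
    exact ih (fun y hy => ht y (by simp [hy]))

-- the first step of a run with label ≠ 1 ignores the incoming cur_s1 (and dually)
lemma step_ignores_c1 (m1 m2 c1 c2 l : Int) (hl : l ≠ 1) :
    pvStepL (m1, m2, c1, c2) l = pvStepL (m1, m2, 0, c2) l := by
  simp [pvStepL, if_neg hl]

lemma step_ignores_c2 (m1 m2 c1 c2 l : Int) (hl : l ≠ 2) :
    pvStepL (m1, m2, c1, c2) l = pvStepL (m1, m2, c1, 0) l := by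
  unfold pvStepL; split_ifs <;> simp_all

-- head of a non-trivial dropWhile fails the predicate
lemma dropWhile_cons_head_false (p : Int → Bool) :
    ∀ (l : List Int) (y : Int) (d' : List Int), l.dropWhile p = y :: d' → p y = false := by
  intro l
  induction l with
  | nil => intro y d' h; simp at h
  | cons a l ih =>
    intro y d' h
    rw [List.dropWhile_cons] at h
    by_cases hpa : p a
    · rw [if_pos hpa] at h
      exact ih _ _ h
    · rw [if_neg hpa] at h
      cases h
      simpa using hpa

-- main invariant: the label fold from (m1, m2, 0, 0) is the m-shifted best of the runs
lemma mainInv : ∀ n (labels : List Int), labels.length ≤ n → ∀ m1 m2 : Int,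
    0 ≤ m1 → 0 ≤ m2 →
    (labels.foldl pvStepL (m1, m2, 0, 0)).1
        = max m1 ((pvRuns labels).foldl pvBestStep (0, 0)).1 ∧
    (labels.foldl pvStepL (m1, m2, 0, 0)).2.1
        = max m2 ((pvRuns labels).foldl pvBestStep (0, 0)).2 := by
  intro n
  induction n with
  | zero =>
    intro labels hlen m1 m2 hm1 hm2
    have : labels = [] := List.length_eq_zero_iff.mp (Nat.le_zero.mp hlen)
    subst this
    simp [pvRuns]
    omega
  | succ n ih =>
    intro labels hlen m1 m2 hm1 hm2
    match labels with
    | [] =>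
      simp [pvRuns]
      omega
    | x :: xs =>
      set t := xs.takeWhile (fun y => y == x) with hT
      set d := xs.dropWhile (fun y => y == x) with hD
      have hxs : t ++ d = xs := List.takeWhile_append_dropWhile
      have htmem : ∀ y ∈ t, y = x := by
        intro y hy
        have := List.mem_takeWhile_imp (hT ▸ hy)
        simpa using this
      have hxslen : xs.length ≤ n := by
        simpa using Nat.lt_succ_iff.mp (Nat.lt_of_lt_of_le (by simp) hlen)
      have hdlt : d.length ≤ n := le_trans (hD ▸ List.length_dropWhile_le _ _) hxslen
      have hruns : pvRuns (x :: xs) = (x, 1 + (t.length : Int)) :: pvRuns d := by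
        rw [pvRuns]
      set N : Int := 1 + (t.length : Int) with hN
      have hC := bestNonneg (pvRuns d) 0 0 le_rfl le_rfl
      set C := (pvRuns d).foldl pvBestStep (0, 0) with hCdef
      by_cases hx1 : x = 1
      · subst hx1
        have hstep : pvStepL (m1, m2, 0, 0) (1 : Int) = (max m1 1, m2, 1, 0) := by
          simp [pvStepL, Prod.ext_iff]
          omega
        have hblock := onesBlock t htmem (max m1 1) m2 1 hm2 (le_max_right _ _)
        rw [← hN] at hblock
        rw [show max (max m1 1) N = max m1 N from by omega] at hblock
        have hfold : (1 :: xs).foldl pvStepL (m1, m2, 0, 0)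
            = d.foldl pvStepL (max m1 N, m2, N, 0) := by
          conv_lhs => rw [show (1 :: xs : List Int) = 1 :: (t ++ d) by rw [hxs]]
          rw [List.foldl_cons, hstep, List.foldl_append, hblock]
        have hbest : ((1, N) :: pvRuns d).foldl pvBestStep (0, 0) = (max N C.1, C.2) := by
          rw [List.foldl_cons, show pvBestStep (0, 0) (1, N) = (max 0 N, 0) by
                simp [pvBestStep],
              bestShift _ _ _ (by omega) le_rfl, ← hCdef]
          simp only [Prod.mk.injEq, and_true, true_and]
          omega
        rw [hfold, hruns, hbest]
        by_cases hdnil : d = []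
        · have hC0 : C = (0, 0) := by rw [hCdef, hdnil]; simp [pvRuns]
          rw [hdnil, hC0]
          simp only [List.foldl_nil]
          constructor
          · omega
          · omega
        · obtain ⟨y, d', hyd⟩ := List.exists_cons_of_ne_nil hdnil
          have hy1 : y ≠ 1 := by
            have := dropWhile_cons_head_false (fun z => z == (1 : Int)) xs y d'
              (by rw [← hD]; exact hyd)
            simpa using this
          rw [hyd]
          rw [show (y :: d').foldl pvStepL (max m1 N, m2, N, 0)
              = (y :: d').foldl pvStepL (max m1 N, m2, 0, 0) by
            rw [List.foldl_cons, List.foldl_cons, step_ignores_c1 _ _ _ _ _ hy1]]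
          have hIH := ih (y :: d') (by rw [hyd] at hdlt; exact hdlt) (max m1 N) m2 (by omega) hm2
          rw [hyd] at hCdef
          rw [hIH.1, hIH.2, ← hCdef]
          constructor
          · omega
          · rfl
      · by_cases hx2 : x = 2
        · subst hx2
          have hstep : pvStepL (m1, m2, 0, 0) (2 : Int) = (m1, max m2 1, 0, 1) := by
            simp [pvStepL, Prod.ext_iff]
            omega
          have hblock := twosBlock t htmem m1 (max m2 1) 1 hm1 (le_max_right _ _)
          rw [← hN] at hblock
          rw [show max (max m2 1) N = max m2 N from by omega] at hblock
          have hfold : (2 :: xs).foldl pvStepL (m1, m2, 0, 0)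
              = d.foldl pvStepL (m1, max m2 N, 0, N) := by
            conv_lhs => rw [show (2 :: xs : List Int) = 2 :: (t ++ d) by rw [hxs]]
            rw [List.foldl_cons, hstep, List.foldl_append, hblock]
          have hbest : ((2, N) :: pvRuns d).foldl pvBestStep (0, 0) = (C.1, max N C.2) := by
            rw [List.foldl_cons, show pvBestStep (0, 0) (2, N) = (0, max 0 N) by
                  simp [pvBestStep],
                bestShift _ _ _ le_rfl (by omega), ← hCdef]
            simp only [Prod.mk.injEq, and_true, true_and]
            omega
          rw [hfold, hruns, hbest]
          by_cases hdnil : d = []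
          · have hC0 : C = (0, 0) := by rw [hCdef, hdnil]; simp [pvRuns]
            rw [hdnil, hC0]
            simp only [List.foldl_nil]
            constructor
            · omega
            · omega
          · obtain ⟨y, d', hyd⟩ := List.exists_cons_of_ne_nil hdnil
            have hy2 : y ≠ 2 := by
              have := dropWhile_cons_head_false (fun z => z == (2 : Int)) xs y d'
                (by rw [← hD]; exact hyd)
              simpa using this
            rw [hyd]
            rw [show (y :: d').foldl pvStepL (m1, max m2 N, 0, N)
                = (y :: d').foldl pvStepL (m1, max m2 N, 0, 0) by
              rw [List.foldl_cons, List.foldl_cons, step_ignores_c2 _ _ _ _ _ hy2]]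
            have hIH := ih (y :: d') (by rw [hyd] at hdlt; exact hdlt) m1 (max m2 N) hm1 (by omega)
            rw [hyd] at hCdef
            rw [hIH.1, hIH.2, ← hCdef]
            constructor
            · rfl
            · omega
        · have hstep : pvStepL (m1, m2, 0, 0) x = (m1, m2, 0, 0) := by
            simp only [pvStepL, if_neg hx1, if_neg hx2]
            simp [Prod.ext_iff]
            omega
          have hblock := zerosBlock t (fun y hy => by
            have h := htmem y hy
            exact ⟨h ▸ hx1, h ▸ hx2⟩) m1 m2 hm1 hm2
          have hfold : (x :: xs).foldl pvStepL (m1, m2, 0, 0)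
              = d.foldl pvStepL (m1, m2, 0, 0) := by
            conv_lhs => rw [show (x :: xs : List Int) = x :: (t ++ d) by rw [hxs]]
            rw [List.foldl_cons, hstep, List.foldl_append, hblock]
          have hbest : ((x, N) :: pvRuns d).foldl pvBestStep (0, 0) = C := by
            rw [List.foldl_cons, show pvBestStep (0, 0) (x, N) = (0, 0) by
                  simp [pvBestStep, if_neg hx1, if_neg hx2]]
          rw [hfold, hruns, hbest]
          exact ih d hdlt m1 m2 hm1 hm2

-- ===== VERDICT (by name: the statement is the Claim_ definition above) =====
theorem calculate_dominant_series_spec : Claim_equal_calculate_dominant_series := by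
  intro history _ _
  unfold Spec_calculate_dominant_series calculate_dominant_series calculate_dominant_series_alt
  rw [foldA_eq_foldL]
  have h := mainInv (history.map (fun mv => pvLabel mv.1 mv.2)).length _ le_rfl 0 0 le_rfl le_rfl
  have hnn := bestNonneg (pvRuns (history.map (fun mv => pvLabel mv.1 mv.2))) 0 0 le_rfl le_rfl
  dsimp only
  rw [Prod.ext_iff]
  exact ⟨by rw [h.1]; omega, by rw [h.2]; omega⟩
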